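-- pv_equiv track=rewrite | github.com/ccc114b/cccocw | _book/alg/_code/03/03-3-fibonacci.py | fibonacci_table
-- ===== SOURCE A (Python) =====
-- from typing import List, Dict, Callable, Tuple
--
-- def fibonacci_table(max_n: int) -> List[int]:
--     """
--     建立費波那契數查詢表
--
--     參數:
--         max_n: 最大索引
--
--     返回:
--         查詢表列表
--     """
--     table = [0] * (max_n + 1)
--
--     for i in range(max_n + 1):
--         if i <= 1:
--             table[i] = i
--         else:
--             table[i] = table[i - 1] + table[i - 2]
--
--     return table
-- ===== SOURCE B (Python) =====
-- def fibonacci_table(max_n: int):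
--     """Fast-doubling Fibonacci: each entry computed independently from the
--     doubling identities F(2k) = F(k)*(2*F(k+1)-F(k)), F(2k+1) = F(k)^2 + F(k+1)^2,
--     instead of filling a DP table with the linear recurrence."""
--     def fib_pair(k):
--         # returns (F(k), F(k+1)) by recursion on the bits of k
--         if k == 0:
--             return (0, 1)
--         f, g = fib_pair(k >> 1)
--         c = f * (2 * g - f)
--         d = f * f + g * g
--         if k & 1:
--             return (d, c + d)
--         return (c, d)
--     return [fib_pair(i)[0] for i in range(max_n + 1)]
-- ===== Notes on version B (the rewrite author's own statement) =====
-- stated objective: alternative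
-- what changed: Replaces the linear DP table filled by table[i-1]+table[i-2] with a recursive fast-doubling computation (F(2k), F(2k+1) identities) of each entry independently, read off the bits of the index.
import Mathlib
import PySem

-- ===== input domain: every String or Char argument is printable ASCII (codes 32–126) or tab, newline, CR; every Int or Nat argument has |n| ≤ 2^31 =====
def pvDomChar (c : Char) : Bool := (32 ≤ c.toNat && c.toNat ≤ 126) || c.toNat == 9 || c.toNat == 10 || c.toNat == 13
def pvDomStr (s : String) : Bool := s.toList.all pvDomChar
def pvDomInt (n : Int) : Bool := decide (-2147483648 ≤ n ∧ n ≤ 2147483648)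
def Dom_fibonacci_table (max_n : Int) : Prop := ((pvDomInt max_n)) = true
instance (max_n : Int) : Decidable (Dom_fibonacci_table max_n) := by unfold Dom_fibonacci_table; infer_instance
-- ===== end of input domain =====

-- B replaces A's linear DP table (table[i] = table[i-1] + table[i-2]) by a recursive
-- fast-doubling computation of each entry from the bits of its index (objective: alternative).

-- ===== PORT A =====
-- table[i-1] / table[i-2] are always in range inside A's loop, so pyGetD with default 0 is exact here.
def fibonacci_table (max_n : Int) : List Int :=
  let table := List.replicate (max_n + 1).toNat 0
  (PySem.List.pyRange 0 (max_n + 1) 1).foldl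
    (fun t i =>
      if i ≤ 1 then t.set i.toNat i
      else t.set i.toNat (PySem.List.pyGetD t (i - 1) 0 + PySem.List.pyGetD t (i - 2) 0))
    table

-- ===== PORT B =====
-- fib_pair is only ever called on the nonnegative i of range(max_n+1), so it is ported on
-- Nat (k >> 1 = k / 2 and k & 1 = k % 2, exact for nonnegative k).
def fibPair : Nat → Int × Int
  | 0 => (0, 1)
  | k + 1 =>
    let p := fibPair ((k + 1) / 2)
    let f := p.1
    let g := p.2
    let c := f * (2 * g - f)
    let d := f * f + g * g
    if (k + 1) % 2 == 1 then (d, c + d) else (c, d)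
decreasing_by omega

def fibonacci_table_alt (max_n : Int) : List Int :=
  (PySem.List.pyRange 0 (max_n + 1) 1).map (fun i => (fibPair i.toNat).1)

-- ===== PRECONDITION & SPEC =====
def Spec_fibonacci_table (max_n : Int) (out : List Int) : Prop := out = fibonacci_table_alt max_n
instance (max_n : Int) (out : List Int) : Decidable (Spec_fibonacci_table max_n out) := by unfold Spec_fibonacci_table; infer_instance

-- ===== CLAIM (what is proved, stated in full; the proofs are below) =====
def Claim_equal_fibonacci_table : Prop := ∀ (max_n : Int), Dom_fibonacci_table max_n → Spec_fibonacci_table max_n (fibonacci_table max_n)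

-- ===== LEMMAS AND PROOFS =====

-- The mathematical Fibonacci sequence (proof-side reference; neither port uses it).
def fibI : Nat → Int
  | 0 => 0
  | 1 => 1
  | n + 2 => fibI (n + 1) + fibI n

lemma fibI_eq_fib : ∀ n, fibI n = (Nat.fib n : Int)
  | 0 => by simp [fibI]
  | 1 => by simp [fibI]
  | n + 2 => by
      rw [fibI, fibI_eq_fib (n + 1), fibI_eq_fib n, Nat.fib_add_two]
      push_cast
      ring

lemma fibI_two_mul (m : Nat) :
    fibI (2 * m) = fibI m * (2 * fibI (m + 1) - fibI m) := by
  have h := Nat.fib_two_mul m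
  have hle : Nat.fib m ≤ 2 * Nat.fib (m + 1) := by
    have := Nat.fib_le_fib_succ (n := m); omega
  rw [fibI_eq_fib, fibI_eq_fib, fibI_eq_fib, h]
  zify [hle]

lemma fibI_two_mul_add_one (m : Nat) :
    fibI (2 * m + 1) = fibI m * fibI m + fibI (m + 1) * fibI (m + 1) := by
  have h := Nat.fib_two_mul_add_one m
  rw [fibI_eq_fib, fibI_eq_fib, fibI_eq_fib, h]
  push_cast
  ring

lemma fibI_add_two (m : Nat) : fibI (m + 2) = fibI (m + 1) + fibI m := by
  rw [fibI]

lemma fibPair_eq (n : Nat) : fibPair n = (fibI n, fibI (n + 1)) := by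
  induction n using Nat.strong_induction_on with
  | _ n ih =>
    match n with
    | 0 => simp [fibPair, fibI]
    | k + 1 =>
      rw [fibPair]
      rw [ih ((k + 1) / 2) (by omega)]
      simp only []
      by_cases hodd : (k + 1) % 2 = 1
      · obtain ⟨m, hm⟩ : ∃ m, k + 1 = 2 * m + 1 := ⟨(k + 1) / 2, by omega⟩
        have hdiv : (k + 1) / 2 = m := by omega
        rw [hdiv, hm]
        simp only [hm] at hodd ⊢
        rw [if_pos (by simp)]
        have h1 := fibI_two_mul m
        have h2 := fibI_two_mul_add_one m
        have h3 := fibI_add_two (2 * m)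
        refine Prod.ext ?_ ?_
        · simp only
          rw [h2]
        · simp only
          have h4 : 2 * m + 1 + 1 = 2 * m + 2 := by ring
          rw [h4, h3, h1, h2]
          ring
      · obtain ⟨m, hm⟩ : ∃ m, k + 1 = 2 * m := ⟨(k + 1) / 2, by omega⟩
        have hdiv : (k + 1) / 2 = m := by omega
        rw [hdiv, hm]
        rw [if_neg (by simp)]
        refine Prod.ext ?_ ?_
        · simp only
          rw [fibI_two_mul m]
        · simp only
          rw [show 2 * m + 1 = 2 * m + 1 from rfl, fibI_two_mul_add_one m]

def stepA (t : List Int) (i : Int) : List Int :=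
  if i ≤ 1 then t.set i.toNat i
  else t.set i.toNat (PySem.List.pyGetD t (i - 1) 0 + PySem.List.pyGetD t (i - 2) 0)

lemma fibonacci_table_eq (max_n : Int) :
    fibonacci_table max_n =
      (PySem.List.pyRange 0 (max_n + 1) 1).foldl stepA (List.replicate (max_n + 1).toNat 0) := rfl

lemma foldA_invariant (m k : Nat) (hk : k ≤ m) :
    (PySem.List.pyRange 0 (k : Int) 1).foldl stepA (List.replicate m 0) =
      (List.range k).map fibI ++ List.replicate (m - k) 0 := by
  induction k with
  | zero => simp
  | succ k ih =>
    have hk' : k ≤ m := Nat.le_of_succ_le hk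
    have hr : PySem.List.pyRange 0 ((k : Int) + 1) 1 =
        PySem.List.pyRange 0 (k : Int) 1 ++ [(k : Int)] :=
      PySem.List.pyRange_one_succ_right (by exact_mod_cast Nat.zero_le k)
    have hcast : ((k : Nat) : Int) + 1 = ((k + 1 : Nat) : Int) := by push_cast; ring
    rw [← hcast, hr, List.foldl_append, ih hk']
    simp only [List.foldl_cons, List.foldl_nil]
    unfold stepA
    by_cases h1 : (k : Int) ≤ 1
    · have hk1 : k ≤ 1 := by exact_mod_cast h1
      interval_cases k
      · simp only [if_pos h1]
        have hm : 1 ≤ m := hk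
        obtain ⟨m', rfl⟩ : ∃ m', m = m' + 1 := ⟨m - 1, by omega⟩
        simp [List.range_succ, fibI, List.replicate_succ]
      · simp only [if_pos h1]
        have hm : 2 ≤ m := hk
        obtain ⟨m', rfl⟩ : ∃ m', m = m' + 2 := ⟨m - 2, by omega⟩
        simp [List.range_succ, fibI, List.replicate_succ, List.set]
    · have hk2 : 2 ≤ k := by omega
      rw [if_neg h1]
      have hlen : ((List.range k).map fibI).length = k := by simp
      have hget1 : PySem.List.pyGetD ((List.range k).map fibI ++ List.replicate (m - k) 0)
          ((k : Int) - 1) 0 = fibI (k - 1) := by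
        have : ((k : Int) - 1) = ((k - 1 : Nat) : Int) := by omega
        rw [this, PySem.List.pyGetD_natCast]
        rw [List.getD_eq_getElem _ _ (by simp; omega)]
        rw [List.getElem_append_left (by omega)]
        simp
      have hget2 : PySem.List.pyGetD ((List.range k).map fibI ++ List.replicate (m - k) 0)
          ((k : Int) - 2) 0 = fibI (k - 2) := by
        have : ((k : Int) - 2) = ((k - 2 : Nat) : Int) := by omega
        rw [this, PySem.List.pyGetD_natCast]
        rw [List.getD_eq_getElem _ _ (by simp; omega)]
        rw [List.getElem_append_left (by omega)]
        simp
      rw [hget1, hget2]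
      have htoNat : ((k : Int)).toNat = k := by simp
      rw [htoNat]
      have hset : ((List.range k).map fibI ++ List.replicate (m - k) 0).set k
          (fibI (k - 1) + fibI (k - 2)) =
          (List.range k).map fibI ++ (List.replicate (m - k) 0).set 0 (fibI (k - 1) + fibI (k - 2)) := by
        rw [List.set_append]
        simp [hlen]
      rw [hset]
      obtain ⟨r, hr'⟩ : ∃ r, m - k = r + 1 := ⟨m - k - 1, by omega⟩
      rw [hr', List.replicate_succ]
      have hfib : fibI (k - 1) + fibI (k - 2) = fibI k := by
        obtain ⟨k', rfl⟩ : ∃ k', k = k' + 2 := ⟨k - 2, by omega⟩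
        simp [fibI]
      simp [List.range_succ, hfib]
      omega

lemma altB_eq (n : Nat) :
    (PySem.List.pyRange 0 (n : Int) 1).map (fun i => (fibPair i.toNat).1) =
      (List.range n).map fibI := by
  induction n with
  | zero => simp
  | succ n ih =>
    have hr : PySem.List.pyRange 0 ((n : Int) + 1) 1 =
        PySem.List.pyRange 0 (n : Int) 1 ++ [(n : Int)] :=
      PySem.List.pyRange_one_succ_right (by exact_mod_cast Nat.zero_le n)
    have hcast : ((n : Nat) : Int) + 1 = ((n + 1 : Nat) : Int) := by push_cast; ring
    rw [← hcast, hr, List.map_append, ih]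
    simp [List.range_succ, fibPair_eq]

lemma pyRange_toNat (x : Int) :
    PySem.List.pyRange 0 x 1 = PySem.List.pyRange 0 ((x.toNat : Nat) : Int) 1 := by
  by_cases h : 0 ≤ x
  · rw [Int.toNat_of_nonneg h]
  · rw [PySem.List.pyRange_one_eq_nil (by omega), PySem.List.pyRange_one_eq_nil (by omega)]

-- ===== VERDICT (by name: the statement is the Claim_ definition above) =====
theorem fibonacci_table_spec : Claim_equal_fibonacci_table := by
  intro max_n _
  show fibonacci_table max_n = fibonacci_table_alt max_n
  rw [fibonacci_table_eq]
  unfold fibonacci_table_alt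
  rw [pyRange_toNat (max_n + 1)]
  rw [foldA_invariant (max_n + 1).toNat (max_n + 1).toNat le_rfl,
      altB_eq (max_n + 1).toNat]
  simp
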